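-- pv_equiv track=rewrite | github.com/mrandi-art/Hmm | bot.py | check_player_levelup
-- ===== SOURCE A (Python) =====
-- def get_required_player_exp(level):
--     if level >= 100: return 999999999
--     if 1 <= level <= 5: return 200
--     if 6 <= level <= 10: return 500
--     if 11 <= level <= 20: return 1500
--     if 21 <= level <= 30: return 2000
--     if 31 <= level <= 70: return 3000
--     if 71 <= level <= 100: return 6000
--     return 10000
--
-- def check_player_levelup(p):
--     lvl = p.get('level', 1)
--     exp = p.get('exp', 0)
--     req = get_required_player_exp(lvl)
--     levels_gained = 0
--
--     # Ensure we don't exceed level 100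
--     while exp >= req and lvl < 100:
--         exp -= req
--         lvl += 1
--         levels_gained += 1
--         req = get_required_player_exp(lvl)
--
--         # Apply your specific rewards per level gained
--         p['clovers'] = p.get('clovers', 0) + 10
--         p['berries'] = p.get('berries', 0) + 500
--         p['bounty'] = p.get('bounty', 0) + 40
--
--     p['level'] = lvl
--     p['exp'] = exp
--     return levels_gained
-- ===== SOURCE B (Python) =====
-- def _band(lvl):
--     # (exp required at this level, last level of the band usable for stepping)
--     if lvl <= 0: return 10000, 0
--     if lvl <= 5: return 200, 5
--     if lvl <= 10: return 500, 10
--     if lvl <= 20: return 1500, 20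
--     if lvl <= 30: return 2000, 30
--     if lvl <= 70: return 3000, 70
--     return 6000, 99
--
-- def check_player_levelup(p):
--     lvl = p.get('level', 1)
--     exp = p.get('exp', 0)
--     gained = 0
--     while lvl < 100:
--         req, upper = _band(lvl)
--         if exp < req:
--             break
--         k = min(upper + 1 - lvl, exp // req)
--         exp -= k * req
--         lvl += k
--         gained += k
--     if gained:
--         p['clovers'] = p.get('clovers', 0) + 10 * gained
--         p['berries'] = p.get('berries', 0) + 500 * gained
--         p['bounty'] = p.get('bounty', 0) + 40 * gained
--     p['level'] = lvl
--     p['exp'] = exp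
--     return gained
-- ===== Notes on version B (the rewrite author's own statement) =====
-- stated objective: alternative
-- what changed: B walks the exp-requirement bands, consuming min(levels left in band, exp//req) levels per band step, instead of A's one-level-at-a-time loop; rewards are added once from the total levels gained.
import Mathlib
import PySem

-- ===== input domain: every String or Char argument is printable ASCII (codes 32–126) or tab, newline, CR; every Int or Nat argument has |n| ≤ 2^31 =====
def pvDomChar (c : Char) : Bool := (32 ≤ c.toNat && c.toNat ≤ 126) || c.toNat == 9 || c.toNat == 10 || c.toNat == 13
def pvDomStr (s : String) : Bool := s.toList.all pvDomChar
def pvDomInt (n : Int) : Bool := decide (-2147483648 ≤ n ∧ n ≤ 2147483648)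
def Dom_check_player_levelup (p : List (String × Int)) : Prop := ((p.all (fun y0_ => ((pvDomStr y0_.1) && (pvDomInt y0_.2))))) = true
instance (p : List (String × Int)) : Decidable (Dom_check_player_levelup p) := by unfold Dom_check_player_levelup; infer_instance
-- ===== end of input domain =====

-- B replaces A's one-level-at-a-time loop by a walk over the exp-cost bands (alternative decomposition,
-- same cost class on realistic inputs). Both Pythons also mutate p identically (level/exp/rewards);
-- the equivalence proved here is about the RETURN value (levels gained) only.

-- ===== PORT A =====

-- p.get(k, d): first-match lookup in the association list (shared by both ports)
def pvGetD (p : List (String × Int)) (k : String) (d : Int) : Int :=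
  match p.find? (fun kv => kv.1 == k) with
  | some kv => kv.2
  | none => d

def get_required_player_exp (level : Int) : Int :=
  if level ≥ 100 then 999999999
  else if 1 ≤ level ∧ level ≤ 5 then 200
  else if 6 ≤ level ∧ level ≤ 10 then 500
  else if 11 ≤ level ∧ level ≤ 20 then 1500
  else if 21 ≤ level ∧ level ≤ 30 then 2000
  else if 31 ≤ level ∧ level ≤ 70 then 3000
  else if 71 ≤ level ∧ level ≤ 100 then 6000
  else 10000

-- A's while loop; the dict writes inside it do not affect the return value, so the loop state is (exp, lvl, gained)
def loopA (exp lvl g : Int) : Int :=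
  if h : get_required_player_exp lvl ≤ exp ∧ lvl < 100 then
    loopA (exp - get_required_player_exp lvl) (lvl + 1) (g + 1)
  else g
termination_by (100 - lvl).toNat
decreasing_by omega

def check_player_levelup (p : List (String × Int)) : Int :=
  loopA (pvGetD p "exp" 0) (pvGetD p "level" 1) 0

-- ===== PORT B =====

def pvBand (lvl : Int) : Int × Int :=
  if lvl ≤ 0 then (10000, 0)
  else if lvl ≤ 5 then (200, 5)
  else if lvl ≤ 10 then (500, 10)
  else if lvl ≤ 20 then (1500, 20)
  else if lvl ≤ 30 then (2000, 30)
  else if lvl ≤ 70 then (3000, 70)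
  else (6000, 99)

-- facts the band-walk loop needs for termination (cited by loopB's decreasing_by)
theorem pvBand_facts (lvl : Int) (h : lvl < 100) :
    0 < (pvBand lvl).1 ∧ lvl ≤ (pvBand lvl).2 ∧ (pvBand lvl).2 ≤ 99 := by
  unfold pvBand; split_ifs <;> simp <;> omega

def loopB (exp lvl g : Int) : Int :=
  if hl : lvl < 100 then
    let rq := (pvBand lvl).1
    let up := (pvBand lvl).2
    if hr : rq ≤ exp then
      let k := min (up + 1 - lvl) (PySem.Int.floordiv exp rq)
      loopB (exp - k * rq) (lvl + k) (g + k)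
    else g
  else g
termination_by (100 - lvl).toNat
decreasing_by
  have hb := pvBand_facts lvl hl
  have h1 : (1 : Int) ≤ PySem.Int.floordiv exp (pvBand lvl).1 :=
    (PySem.Int.le_floordiv_iff_mul_le hb.1).2 (by linarith)
  omega

def check_player_levelup_alt (p : List (String × Int)) : Int :=
  loopB (pvGetD p "exp" 0) (pvGetD p "level" 1) 0

-- ===== PRECONDITION & SPEC =====
def Spec_check_player_levelup (p : List (String × Int)) (out : Int) : Prop := out = check_player_levelup_alt p
instance (p : List (String × Int)) (out : Int) : Decidable (Spec_check_player_levelup p out) := by unfold Spec_check_player_levelup; infer_instance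

-- ===== CLAIM (what is proved, stated in full; the proofs are below) =====
def Claim_equal_check_player_levelup : Prop := ∀ (p : List (String × Int)), Dom_check_player_levelup p → Spec_check_player_levelup p (check_player_levelup p)

-- ===== LEMMAS AND PROOFS =====

theorem req_pos (lvl : Int) : 0 < get_required_player_exp lvl := by
  unfold get_required_player_exp; split_ifs <;> norm_num

theorem band_req_eq (lvl : Int) (h : lvl < 100) : (pvBand lvl).1 = get_required_player_exp lvl := by
  unfold pvBand get_required_player_exp; split_ifs <;> first | rfl | omega

-- get_required_player_exp with the overlapping if-chain flattened to disjoint bands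
theorem req_eval (lvl : Int) :
    get_required_player_exp lvl =
      if lvl ≥ 100 then 999999999 else if lvl ≤ 0 then 10000 else if lvl ≤ 5 then 200
      else if lvl ≤ 10 then 500 else if lvl ≤ 20 then 1500 else if lvl ≤ 30 then 2000
      else if lvl ≤ 70 then 3000 else 6000 := by
  unfold get_required_player_exp; split_ifs <;> omega

theorem req_const (lvl m : Int) (h1 : lvl < 100) (h2 : lvl ≤ m) (h3 : m ≤ (pvBand lvl).2) :
    get_required_player_exp m = get_required_player_exp lvl := by
  rw [req_eval, req_eval]
  unfold pvBand at h3
  split_ifs at h3 with c1 c2 c3 c4 c5 c6 <;> simp only [] at h3 <;> split_ifs <;> omega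

theorem loopA_band (k : Nat) : ∀ (exp lvl g : Int), lvl + k ≤ 100 →
    (∀ j : Nat, j < k → get_required_player_exp (lvl + j) = get_required_player_exp lvl) →
    (k : Int) * get_required_player_exp lvl ≤ exp →
    loopA exp lvl g = loopA (exp - k * get_required_player_exp lvl) (lvl + k) (g + k) := by
  induction k with
  | zero => intro exp lvl g _ _ _; simp
  | succ k ih =>
    intro exp lvl g hle hconst hexp
    have hr := req_pos lvl
    have hkr : (0:Int) ≤ (k : Int) * get_required_player_exp lvl :=
      mul_nonneg (by positivity) (le_of_lt hr)
    have hge : get_required_player_exp lvl ≤ exp := by push_cast at hexp; nlinarith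
    rw [loopA]
    rw [dif_pos (show get_required_player_exp lvl ≤ exp ∧ lvl < 100 from ⟨hge, by push_cast at hle; omega⟩)]
    by_cases hk0 : k = 0
    · subst hk0
      congr 1 <;> push_cast <;> ring
    have hc1 : get_required_player_exp (lvl + 1) = get_required_player_exp lvl := by
      have := hconst 1 (by omega); simpa using this
    have hle' : lvl + 1 + (k : Int) ≤ 100 := by push_cast at hle; omega
    have := ih (exp - get_required_player_exp lvl) (lvl + 1) (g + 1)
      hle'
      (by intro j hj
          have h2 := hconst (j + 1) (by omega)
          rw [hc1]
          have : lvl + 1 + (j : Int) = lvl + ((j : Nat) + 1 : Nat) := by push_cast; ring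
          rw [this, h2])
      (by rw [hc1]; push_cast at hexp ⊢; nlinarith)
    rw [this, hc1]
    congr 1 <;> push_cast <;> ring

theorem loopAB (n : Nat) : ∀ (exp lvl g : Int), (100 - lvl).toNat ≤ n →
    loopA exp lvl g = loopB exp lvl g := by
  induction n with
  | zero =>
    intro exp lvl g hn
    have hl : ¬ lvl < 100 := by omega
    rw [loopA, loopB, dif_neg (by tauto), dif_neg hl]
  | succ n ih =>
    intro exp lvl g hn
    by_cases hl : lvl < 100
    · have hb := pvBand_facts lvl hl
      have hreq := band_req_eq lvl hl
      have hr := req_pos lvl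
      by_cases he : get_required_player_exp lvl ≤ exp
      · -- one band step of B = k steps of A
        rw [loopB, dif_pos hl]
        simp only [hreq]
        rw [dif_pos he]
        set r := get_required_player_exp lvl with hrdef
        set k : Int := min ((pvBand lvl).2 + 1 - lvl) (PySem.Int.floordiv exp r) with hkdef
        have hfd : (1:Int) ≤ PySem.Int.floordiv exp r :=
          (PySem.Int.le_floordiv_iff_mul_le hr).2 (by linarith)
        have hk1 : 1 ≤ k := by omega
        have hkr : k * r ≤ exp := by
          have : k ≤ PySem.Int.floordiv exp r := by omega
          exact (PySem.Int.le_floordiv_iff_mul_le hr).1 this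
        have hk100 : lvl + k ≤ 100 := by omega
        have hkc : ((k.toNat : Int)) = k := by omega
        have hstep := loopA_band k.toNat exp lvl g
          (by omega)
          (by intro j hj
              apply req_const lvl (lvl + j) hl (by omega)
              omega)
          (by rw [hkc]; exact hkr)
        rw [hstep, hkc]
        exact ih _ _ _ (by omega)
      · rw [loopA, loopB, dif_neg (by tauto), dif_pos hl]
        simp only [hreq]
        rw [dif_neg he]
    · rw [loopA, loopB, dif_neg (by tauto), dif_neg hl]

-- ===== VERDICT (by name: the statement is the Claim_ definition above) =====
theorem check_player_levelup_spec : Claim_equal_check_player_levelup := by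
  intro p _
  unfold Spec_check_player_levelup check_player_levelup check_player_levelup_alt
  exact loopAB (100 - pvGetD p "level" 1).toNat _ _ _ le_rfl
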